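-- pv_equiv track=rewrite | github.com/lingxiaoli94/POL | pol/utils/validation/scene_saver.py | count_h5_keys
-- ===== SOURCE A (Python) =====
-- def count_h5_keys(gp, prefix):
--     count = 0
--     while True:
--         key = '{}_{}'.format(prefix, count)
--         if key not in gp:
--             break
--         count += 1
--     return count
-- ===== SOURCE B (Python) =====
-- def _decimal_value(s):
--     v = 0
--     for ch in s:
--         v = 10 * v + (ord(ch) - 48)
--     return v
--
--
-- def _canonical(s):
--     return s.isdigit() and not (len(s) > 1 and s[0] == '0')
--
--
-- def count_h5_keys(gp, prefix):
--     p = prefix + '_'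
--     vals = {_decimal_value(key[len(p):])
--             for key in gp
--             if key.startswith(p) and _canonical(key[len(p):])}
--     count = 0
--     for v in sorted(vals):
--         if v != count:
--             break
--         count += 1
--     return count
-- ===== Notes on version B (the rewrite author's own statement) =====
-- stated objective: alternative
-- what changed: A sequentially formats 'prefix_0', 'prefix_1', ... and probes the group for each until one is missing; B never probes: it parses every key's suffix after 'prefix_' that is a canonical decimal numeral into an integer, sorts the distinct values, and computes the answer as the mex by a single sweep over the sorted list.
import Mathlib
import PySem

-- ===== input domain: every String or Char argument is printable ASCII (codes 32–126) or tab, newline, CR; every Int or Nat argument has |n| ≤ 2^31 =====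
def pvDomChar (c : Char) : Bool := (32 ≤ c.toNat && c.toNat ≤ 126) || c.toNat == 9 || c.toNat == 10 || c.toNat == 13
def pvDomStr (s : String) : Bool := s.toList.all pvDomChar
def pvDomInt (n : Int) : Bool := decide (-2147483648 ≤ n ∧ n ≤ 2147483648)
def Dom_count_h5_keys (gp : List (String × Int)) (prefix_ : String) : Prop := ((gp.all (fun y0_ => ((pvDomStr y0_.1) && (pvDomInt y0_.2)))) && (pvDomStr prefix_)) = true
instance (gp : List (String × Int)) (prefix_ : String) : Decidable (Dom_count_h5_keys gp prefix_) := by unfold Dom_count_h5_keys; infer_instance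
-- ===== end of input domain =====

-- A probes the group for 'prefix_0', 'prefix_1', ... until one is missing; B instead parses the
-- canonical decimal suffixes behind 'prefix_' into integers, sorts the distinct values, and takes
-- the answer as the mex by one sweep over the sorted list (objective: alternative).

-- ===== PORT A =====
-- A's 'while True' loop; the fuel gp.length + 1 is a termination guard only: the loop always
-- breaks within it (there are gp.length + 1 pairwise distinct candidate keys and at most
-- gp.length keys in gp; pigeonhole, proved below as pvExists_missA).
def pvCountLoop (keys : List String) (prefix_ : String) : Nat → Int → Int
  | 0, count => count
  | fuel + 1, count =>
      let key := prefix_ ++ "_" ++ PySem.Int.toStr count   -- '{}_{}'.format(prefix, count)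
      if keys.contains key then pvCountLoop keys prefix_ fuel (count + 1) else count

def count_h5_keys (gp : List (String × Int)) (prefix_ : String) : Int :=
  pvCountLoop (gp.map (·.1)) prefix_ (gp.length + 1) 0

-- ===== PORT B =====
-- _decimal_value(s): v = 0; for ch in s: v = 10 * v + (ord(ch) - 48); return v
def pvDecVal (s : String) : Int :=
  s.toList.foldl (fun v ch => 10 * v + ((ch.toNat : Int) - 48)) 0

-- _canonical(s): s.isdigit() and not (len(s) > 1 and s[0] == '0')
def pvCanon (s : String) : Bool :=
  PySem.Str.strIsdigit s && !(decide ((1 : Int) < PySem.Str.len s) && (PySem.Str.pyGet? s 0 == some '0'))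

-- the body of B's set comprehension, for one key
def pvSuffixVal? (p : String) (k : String) : Option Int :=
  if PySem.Str.startswith k p && pvCanon (PySem.Str.slice k (some (PySem.Str.len p)) none)
  then some (pvDecVal (PySem.Str.slice k (some (PySem.Str.len p)) none)) else none

-- vals = {_decimal_value(key[len(p):]) for key in gp if key.startswith(p) and _canonical(key[len(p):])}
def pvVals (gp : List (String × Int)) (p : String) : List Int :=
  PySem.Set.ofList ((gp.map (·.1)).filterMap (pvSuffixVal? p))

-- count = 0; for v in sorted(vals): if v != count: break; count += 1
def pvMexScan : List Int → Int → Int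
  | [], count => count
  | v :: vs, count => if v ≠ count then count else pvMexScan vs (count + 1)

def count_h5_keys_alt (gp : List (String × Int)) (prefix_ : String) : Int :=
  let p := prefix_ ++ "_"
  pvMexScan (PySem.List.sorted (pvVals gp p) (fun x => x) false) 0

-- ===== PRECONDITION & SPEC =====
def Spec_count_h5_keys (gp : List (String × Int)) (prefix_ : String) (out : Int) : Prop := out = count_h5_keys_alt gp prefix_
instance (gp : List (String × Int)) (prefix_ : String) (out : Int) : Decidable (Spec_count_h5_keys gp prefix_ out) := by unfold Spec_count_h5_keys; infer_instance

-- ===== CLAIM =====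
def Claim_equal_count_h5_keys : Prop := ∀ (gp : List (String × Int)) (prefix_ : String), Dom_count_h5_keys gp prefix_ → Spec_count_h5_keys gp prefix_ (count_h5_keys gp prefix_)

-- ===== LEMMAS AND PROOFS =====

-- decimal decoding over Nat
def pvDecode (cs : List Char) : Nat := cs.foldl (fun a c => 10 * a + (c.toNat - 48)) 0

lemma pvCore_acc : ∀ (f n : Nat) (acc : List Char),
    Nat.toDigitsCore 10 f n acc = Nat.toDigitsCore 10 f n [] ++ acc := by
  intro f
  induction f with
  | zero => intro n acc; simp [Nat.toDigitsCore]
  | succ f ih =>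
      intro n acc
      simp only [Nat.toDigitsCore]
      by_cases h : n / 10 = 0
      · simp [h]
      · simp only [h, if_false]
        rw [ih (n / 10) (Nat.digitChar (n % 10) :: acc), ih (n / 10) [Nat.digitChar (n % 10)]]
        simp

lemma pvCore_fuel : ∀ (f₁ f₂ n : Nat), n < f₁ → n < f₂ →
    Nat.toDigitsCore 10 f₁ n [] = Nat.toDigitsCore 10 f₂ n [] := by
  intro f₁
  induction f₁ with
  | zero => intro f₂ n h; omega
  | succ f₁ ih =>
      intro f₂ n h₁ h₂
      obtain ⟨f₂', rfl⟩ : ∃ f₂', f₂ = f₂' + 1 := ⟨f₂ - 1, by omega⟩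
      simp only [Nat.toDigitsCore]
      by_cases h : n / 10 = 0
      · simp [h]
      · simp only [h, if_false]
        have hn : 0 < n := by by_contra hc; simp [Nat.eq_zero_of_not_pos hc] at h
        have hlt : n / 10 < n := Nat.div_lt_self hn (by norm_num)
        rw [pvCore_acc f₁ (n / 10), pvCore_acc f₂' (n / 10), ih f₂' (n / 10) (by omega) (by omega)]

lemma pvToDigits_lt10 (n : Nat) (h : n < 10) : Nat.toDigits 10 n = [Nat.digitChar n] := by
  unfold Nat.toDigits
  simp [Nat.toDigitsCore, Nat.div_eq_of_lt h, Nat.mod_eq_of_lt h]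

lemma pvToDigits_step (n : Nat) (h : 10 ≤ n) :
    Nat.toDigits 10 n = Nat.toDigits 10 (n / 10) ++ [Nat.digitChar (n % 10)] := by
  unfold Nat.toDigits
  have h0 : ¬ (n / 10 = 0) := by
    intro hc; have := Nat.div_eq_of_lt (show n < 10 by omega); omega
  conv_lhs => rw [show n + 1 = n + 1 by rfl]
  simp only [Nat.toDigitsCore]
  rw [if_neg h0, pvCore_acc]
  congr 1
  exact pvCore_fuel n (n / 10 + 1) (n / 10)
    (lt_of_lt_of_le (Nat.div_lt_self (by omega) (by norm_num)) le_rfl) (Nat.lt_succ_self _)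

lemma pvDigitChar_val (d : Nat) (h : d < 10) : (Nat.digitChar d).toNat = 48 + d := by
  interval_cases d <;> decide

lemma pvIsdigit_iff (c : Char) : PySem.Chars.isdigit c = true ↔ 48 ≤ c.toNat ∧ c.toNat ≤ 57 := by
  simp [PySem.Chars.isdigit, Char.le_def]
  constructor
  · rintro ⟨h1, h2⟩
    exact ⟨h1, h2⟩
  · rintro ⟨h1, h2⟩
    exact ⟨h1, h2⟩

lemma pvDigitChar_isdigit (d : Nat) (h : d < 10) : PySem.Chars.isdigit (Nat.digitChar d) = true := by
  interval_cases d <;> decide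

lemma pvDigitChar_of_digit (c : Char) (h : PySem.Chars.isdigit c = true) :
    Nat.digitChar (c.toNat - 48) = c := by
  obtain ⟨h1, h2⟩ := (pvIsdigit_iff c).mp h
  have hv : (Nat.digitChar (c.toNat - 48)).toNat = c.toNat := by
    rw [pvDigitChar_val (c.toNat - 48) (by omega)]; omega
  have : (Nat.digitChar (c.toNat - 48)).val = c.val := by
    have hval : ((Nat.digitChar (c.toNat - 48)).val : UInt32).toNat = (c.val : UInt32).toNat := hv
    exact UInt32.toNat_inj.mp hval
  exact Char.ext this

lemma pvToDigits_digits (n : Nat) : ∀ c ∈ Nat.toDigits 10 n, PySem.Chars.isdigit c = true := by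
  induction n using Nat.strong_induction_on with
  | _ n ih =>
      by_cases h : n < 10
      · rw [pvToDigits_lt10 n h]
        intro c hc
        simp at hc
        rw [hc]
        exact pvDigitChar_isdigit n h
      · rw [pvToDigits_step n (by omega)]
        intro c hc
        rcases List.mem_append.mp hc with hc | hc
        · exact ih (n / 10) (Nat.div_lt_self (by omega) (by norm_num)) c hc
        · simp at hc
          rw [hc]
          exact pvDigitChar_isdigit (n % 10) (Nat.mod_lt _ (by norm_num))

lemma pvToDigits_ne_nil (n : Nat) : Nat.toDigits 10 n ≠ [] := by
  by_cases h : n < 10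
  · rw [pvToDigits_lt10 n h]; simp
  · rw [pvToDigits_step n (by omega)]; simp

lemma pvToDigits_head (n : Nat) (h : 1 ≤ n) : (Nat.toDigits 10 n).head? ≠ some '0' := by
  induction n using Nat.strong_induction_on with
  | _ n ih =>
      by_cases h10 : n < 10
      · rw [pvToDigits_lt10 n h10]
        interval_cases n <;> decide
      · rw [pvToDigits_step n (by omega)]
        rw [List.head?_append_of_ne_nil _ (pvToDigits_ne_nil (n / 10))]
        exact ih (n / 10) (Nat.div_lt_self (by omega) (by norm_num)) (by omega)

lemma pvDecode_core : ∀ (f n : Nat), n < f → pvDecode (Nat.toDigitsCore 10 f n []) = n := by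
  intro f
  induction f with
  | zero => intro n h; omega
  | succ f ih =>
      intro n h
      simp only [Nat.toDigitsCore]
      by_cases h0 : n / 10 = 0
      · simp only [h0, if_true]
        have hn : n < 10 := by omega
        simp [pvDecode, pvDigitChar_val (n % 10) (Nat.mod_lt _ (by norm_num))]
        omega
      · simp only [h0, if_false]
        rw [pvCore_acc]
        have hlt : n / 10 < f := by
          have h1 : 0 < n := by
            by_contra hc
            simp [Nat.eq_zero_of_not_pos hc] at h0
          have := Nat.div_lt_self h1 (by norm_num : 1 < 10)
          omega
        have hv := ih (n / 10) hlt
        simp only [pvDecode] at hv ⊢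
        rw [List.foldl_append]
        simp [hv, pvDigitChar_val (n % 10) (Nat.mod_lt _ (by norm_num))]
        omega

lemma pvDecode_toDigits (n : Nat) : pvDecode (Nat.toDigits 10 n) = n := by
  unfold Nat.toDigits
  exact pvDecode_core (n + 1) n (Nat.lt_succ_self n)

lemma pvToStr_inj (a b : Nat) (h : PySem.Int.toStr (a : Int) = PySem.Int.toStr (b : Int)) : a = b := by
  have hl : (PySem.Int.toStr (a : Int)).toList = (PySem.Int.toStr (b : Int)).toList := by rw [h]
  simp only [PySem.Int.toList_toStr, PySem.Int.toChars] at hl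
  have hna : ¬ ((a : Int) < 0) := by omega
  have hnb : ¬ ((b : Int) < 0) := by omega
  simp only [hna, hnb, if_false, Int.toNat_natCast] at hl
  have hd := congrArg pvDecode hl
  rwa [pvDecode_toDigits, pvDecode_toDigits] at hd

lemma pvDecode_concat (ds : List Char) (d : Char) :
    pvDecode (ds ++ [d]) = 10 * pvDecode ds + (d.toNat - 48) := by
  simp [pvDecode, List.foldl_append]

lemma pvDecode_fold_ge (t : List Char) : ∀ (a : Nat), 1 ≤ a →
    1 ≤ t.foldl (fun a c => 10 * a + (c.toNat - 48)) a := by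
  induction t with
  | nil => intro a ha; simpa using ha
  | cons c t ih =>
      intro a ha
      simp only [List.foldl_cons]
      exact ih _ (by omega)

lemma pvDecode_pos (c : Char) (t : List Char) (hc : PySem.Chars.isdigit c = true) (h0 : c ≠ '0') :
    1 ≤ pvDecode (c :: t) := by
  obtain ⟨h1, h2⟩ := (pvIsdigit_iff c).mp hc
  have hne : c.toNat ≠ 48 := by
    intro hcc
    apply h0
    have : c.val = ('0' : Char).val := UInt32.toNat_inj.mp (by simpa using hcc)
    exact Char.ext this
  simp only [pvDecode, List.foldl_cons]
  exact pvDecode_fold_ge t _ (by omega)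

-- CANONICITY: a nonempty digit string without a leading zero is str of its decoded value
lemma pvCanonicity : ∀ (ds : List Char), ds ≠ [] → (∀ c ∈ ds, PySem.Chars.isdigit c = true) →
    (ds.head? ≠ some '0' ∨ ds = ['0']) → Nat.toDigits 10 (pvDecode ds) = ds := by
  intro ds
  induction ds using List.reverseRecOn with
  | nil => intro h; exact absurd rfl h
  | append_singleton ds d ih =>
      intro _ hdig hlead
      rcases List.eq_nil_or_concat ds with rfl | ⟨ds', d', rfl⟩
      · -- single digit
        have hd : PySem.Chars.isdigit d = true := hdig d (by simp)
        obtain ⟨h1, h2⟩ := (pvIsdigit_iff d).mp hd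
        have hdec : pvDecode ([] ++ [d]) = d.toNat - 48 := by simp [pvDecode]
        rw [hdec, pvToDigits_lt10 _ (by omega), pvDigitChar_of_digit d hd]
        simp
      · -- at least two digits: ds' ++ [d'] ++ [d]
        simp only [List.concat_eq_append] at ih hdig hlead ⊢
        have hds_ne : (ds' ++ [d']) ≠ [] := by simp
        have hdigits' : ∀ c ∈ ds' ++ [d'], PySem.Chars.isdigit c = true := by
          intro c hc; exact hdig c (by simp [List.mem_append] at hc ⊢; tauto)
        have hhead : (ds' ++ [d']).head? ≠ some '0' := by
          rcases hlead with hlead | hlead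
          · intro hc
            apply hlead
            rw [List.head?_append_of_ne_nil _ hds_ne]
            exact hc
          · exfalso
            have := congrArg List.length hlead
            simp at this
        have hd : PySem.Chars.isdigit d = true := hdig d (by simp)
        obtain ⟨hd1, hd2⟩ := (pvIsdigit_iff d).mp hd
        -- decode ≥ 1 on the prefix
        have hpos : 1 ≤ pvDecode (ds' ++ [d']) := by
          rcases List.exists_cons_of_ne_nil hds_ne with ⟨c0, t0, hct⟩
          rw [hct]
          have hc0dig : PySem.Chars.isdigit c0 = true := by
            apply hdigits' c0; rw [hct]; simp
          have hc0 : c0 ≠ '0' := by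
            intro hcc
            apply hhead
            rw [hct, hcc]
            rfl
          exact pvDecode_pos c0 t0 hc0dig hc0
        have hdec : pvDecode ((ds' ++ [d']) ++ [d]) = 10 * pvDecode (ds' ++ [d']) + (d.toNat - 48) :=
          pvDecode_concat _ d
        rw [hdec, pvToDigits_step _ (by omega)]
        have hq : (10 * pvDecode (ds' ++ [d']) + (d.toNat - 48)) / 10 = pvDecode (ds' ++ [d']) := by
          omega
        have hr : (10 * pvDecode (ds' ++ [d']) + (d.toNat - 48)) % 10 = d.toNat - 48 := by
          omega
        rw [hq, hr, ih hds_ne hdigits' (Or.inl hhead), pvDigitChar_of_digit d hd]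

-- toChars of a nonnegative integer is toDigits
lemma pvToChars_natCast (c : Nat) : PySem.Int.toChars (c : Int) = Nat.toDigits 10 c := by
  simp [PySem.Int.toChars]

-- str(c) is a canonical numeral
lemma pvCanon_toStr (c : Nat) : pvCanon (PySem.Int.toStr (c : Int)) = true := by
  have htl : (PySem.Int.toStr (c : Int)).toList = Nat.toDigits 10 c := by
    rw [PySem.Int.toList_toStr, pvToChars_natCast]
  have hdig : PySem.Str.strIsdigit (PySem.Int.toStr (c : Int)) = true := by
    rw [PySem.Str.strIsdigit_eq, htl]
    simp only [PySem.Chars.strIsdigit, Bool.and_eq_true, List.all_eq_true]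
    refine ⟨by simpa [List.isEmpty_iff] using pvToDigits_ne_nil c, ?_⟩
    intro x hx
    exact pvToDigits_digits c x hx
  simp only [pvCanon, hdig, Bool.true_and, Bool.not_eq_eq_eq_not, Bool.not_true,
    Bool.and_eq_false_iff]
  by_cases hc : c = 0
  · left
    subst hc
    rw [PySem.Str.len_eq, htl, pvToDigits_lt10 0 (by norm_num)]
    decide
  · right
    have hhd : (Nat.toDigits 10 c).head? ≠ some '0' := pvToDigits_head c (by omega)
    have hget : PySem.Str.pyGet? (PySem.Int.toStr (c : Int)) 0 = (Nat.toDigits 10 c).head? := by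
      have h0 : ((0 : Nat) : Int) = (0 : Int) := by norm_num
      rw [← h0, PySem.Str.pyGet?_natCast, htl]
      cases Nat.toDigits 10 c <;> simp
    rw [hget]
    simpa using hhd

-- decimal value over Int equals pvDecode when every char is a digit
lemma pvDecVal_eq_decode_aux (cs : List Char) : ∀ (a : Nat), (∀ c ∈ cs, PySem.Chars.isdigit c = true) →
    cs.foldl (fun v ch => 10 * v + ((ch.toNat : Int) - 48)) (a : Int)
      = ((cs.foldl (fun a c => 10 * a + (c.toNat - 48)) a : Nat) : Int) := by
  induction cs with
  | nil => intro a _; simp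
  | cons c cs ih =>
      intro a hd
      have hc := (pvIsdigit_iff c).mp (hd c (by simp))
      simp only [List.foldl_cons]
      have hstep : 10 * (a : Int) + ((c.toNat : Int) - 48) = ((10 * a + (c.toNat - 48) : Nat) : Int) := by
        omega
      rw [hstep, ih _ (fun x hx => hd x (by simp [hx]))]

lemma pvDecVal_eq_decode (s : String) (h : ∀ c ∈ s.toList, PySem.Chars.isdigit c = true) :
    pvDecVal s = ((pvDecode s.toList : Nat) : Int) := by
  simpa [pvDecVal, pvDecode] using pvDecVal_eq_decode_aux s.toList 0 h

-- k = p ++ t  ↔  k starts with p and k[len(p):] = t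
lemma pvSplit_iff (k p t : String) :
    k = p ++ t ↔ (PySem.Str.startswith k p = true ∧
      PySem.Str.slice k (some (PySem.Str.len p)) none = t) := by
  constructor
  · rintro rfl
    constructor
    · rw [PySem.Str.startswith_eq, PySem.Chars.startswith_iff, String.toList_append]
      exact List.prefix_append _ _
    · apply String.ext
      rw [PySem.Str.toList_slice, PySem.Chars.slice_eq_listSlice, PySem.Str.len,
        PySem.List.slice_from _ (by positivity)]
      simp [String.toList_append]
  · rintro ⟨h1, h2⟩
    rw [PySem.Str.startswith_eq, PySem.Chars.startswith_iff] at h1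
    obtain ⟨r, hr⟩ := h1
    have h2l : (PySem.Str.slice k (some (PySem.Str.len p)) none).toList = t.toList := by rw [h2]
    rw [PySem.Str.toList_slice, PySem.Chars.slice_eq_listSlice, PySem.Str.len,
      PySem.List.slice_from _ (by positivity)] at h2l
    have hrt : r = t.toList := by
      rw [← hr] at h2l
      simpa using h2l
    apply String.ext
    rw [String.toList_append, ← hr, hrt]

-- the canonicity consequence: a canonical suffix with value c IS str(c)
lemma pvCanon_eq_toStr (s : String) (c : Nat) (hcan : pvCanon s = true)
    (hval : pvDecVal s = (c : Int)) : s = PySem.Int.toStr (c : Int) := by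
  simp only [pvCanon, Bool.and_eq_true] at hcan
  obtain ⟨hdig, hguard⟩ := hcan
  rw [PySem.Str.strIsdigit_eq] at hdig
  simp only [PySem.Chars.strIsdigit, Bool.and_eq_true, List.all_eq_true] at hdig
  obtain ⟨hne', hall⟩ := hdig
  have hne : s.toList ≠ [] := by simpa [List.isEmpty_iff] using hne'
  have hdeq : pvDecode s.toList = c := by
    rw [pvDecVal_eq_decode s hall] at hval
    exact_mod_cast hval
  have hlead : s.toList.head? ≠ some '0' ∨ s.toList = ['0'] := by
    rw [Bool.not_eq_eq_eq_not, Bool.not_true, Bool.and_eq_false_iff] at hguard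
    rcases hguard with hlen | hget
    · -- len ≤ 1, so the list is a singleton
      rw [PySem.Str.len_eq] at hlen
      simp only [decide_eq_false_iff_not, not_lt] at hlen
      have hlen1 : s.toList.length = 1 := by
        have := List.length_pos_of_ne_nil hne
        omega
      rcases List.length_eq_one_iff.mp hlen1 with ⟨d, hd⟩
      by_cases hd0 : d = '0'
      · right; rw [hd, hd0]
      · left; rw [hd]; simp [hd0]
    · left
      intro hc
      rcases List.exists_cons_of_ne_nil hne with ⟨c0, t0, hct⟩
      rw [hct] at hc
      have hc0 : c0 = '0' := by simpa using hc
      have hg0 : PySem.Str.pyGet? s 0 = some '0' := by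
        have h0 : ((0 : Nat) : Int) = (0 : Int) := by norm_num
        rw [← h0, PySem.Str.pyGet?_natCast, hct, hc0]
        rfl
      rw [hg0] at hget
      simp at hget
  have hcanon := pvCanonicity s.toList hne hall hlead
  rw [hdeq] at hcanon
  apply String.ext
  rw [PySem.Int.toList_toStr, pvToChars_natCast, hcanon]

-- membership correspondence: key 'p_str(c)' present ↔ c collected by B
lemma pvMem_iff (gp : List (String × Int)) (prefix_ : String) (c : Nat) :
    ((prefix_ ++ "_" ++ PySem.Int.toStr (c : Int)) ∈ gp.map (·.1))
      ↔ ((c : Int) ∈ pvVals gp (prefix_ ++ "_")) := by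
  unfold pvVals
  rw [PySem.Set.mem_ofList, List.mem_filterMap]
  constructor
  · intro hk
    refine ⟨prefix_ ++ "_" ++ PySem.Int.toStr (c : Int), hk, ?_⟩
    have h := (pvSplit_iff (prefix_ ++ "_" ++ PySem.Int.toStr (c : Int)) (prefix_ ++ "_")
      (PySem.Int.toStr (c : Int))).mp (by rw [String.append_assoc])
    unfold pvSuffixVal?
    rw [h.2]
    rw [if_pos (by simp only [h.1, pvCanon_toStr c, Bool.and_self])]
    congr 1
    have hall : ∀ ch ∈ (PySem.Int.toStr (c : Int)).toList, PySem.Chars.isdigit ch = true := by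
      intro ch hch
      rw [PySem.Int.toList_toStr, pvToChars_natCast] at hch
      exact pvToDigits_digits c ch hch
    rw [pvDecVal_eq_decode _ hall, PySem.Int.toList_toStr, pvToChars_natCast, pvDecode_toDigits]
  · rintro ⟨k, hk, hf⟩
    unfold pvSuffixVal? at hf
    by_cases hg : (PySem.Str.startswith k (prefix_ ++ "_")
        && pvCanon (PySem.Str.slice k (some (PySem.Str.len (prefix_ ++ "_"))) none)) = true
    · rw [if_pos hg, Option.some_inj] at hf
      simp only [Bool.and_eq_true] at hg
      have hseq : PySem.Str.slice k (some (PySem.Str.len (prefix_ ++ "_"))) none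
          = PySem.Int.toStr (c : Int) := pvCanon_eq_toStr _ c hg.2 hf
      have hkeq : k = (prefix_ ++ "_") ++ PySem.Int.toStr (c : Int) :=
        (pvSplit_iff _ _ _).mpr ⟨hg.1, hseq⟩
      rwa [← hkeq]
    · rw [if_neg hg] at hf
      exact absurd hf (by simp)

-- every value B collects is nonnegative
lemma pvVals_nonneg (gp : List (String × Int)) (p : String) :
    ∀ x ∈ pvVals gp p, 0 ≤ x := by
  intro x hx
  unfold pvVals at hx
  rw [PySem.Set.mem_ofList, List.mem_filterMap] at hx
  obtain ⟨k, _, hf⟩ := hx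
  unfold pvSuffixVal? at hf
  by_cases hg : (PySem.Str.startswith k p
      && pvCanon (PySem.Str.slice k (some (PySem.Str.len p)) none)) = true
  · rw [if_pos hg, Option.some_inj] at hf
    simp only [Bool.and_eq_true] at hg
    have hcan := hg.2
    simp only [pvCanon, Bool.and_eq_true] at hcan
    rw [PySem.Str.strIsdigit_eq] at hcan
    simp only [PySem.Chars.strIsdigit, Bool.and_eq_true, List.all_eq_true] at hcan
    rw [← hf, pvDecVal_eq_decode _ hcan.1.2]
    positivity
  · rw [if_neg hg] at hf
    exact absurd hf (by simp)

-- A's loop returns c + N when the first miss after c is at offset N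
lemma pvLoopA (keys : List String) (prefix_ : String) : ∀ (N f : Nat) (c : Int),
    (∀ j : Nat, j < N → keys.contains (prefix_ ++ "_" ++ PySem.Int.toStr (c + (j : Int))) = true) →
    keys.contains (prefix_ ++ "_" ++ PySem.Int.toStr (c + (N : Int))) = false →
    N < f → pvCountLoop keys prefix_ f c = c + (N : Int) := by
  intro N
  induction N with
  | zero =>
      intro f c _ hmiss hf
      obtain ⟨f', rfl⟩ : ∃ f', f = f' + 1 := ⟨f - 1, by omega⟩
      simp only [pvCountLoop]
      rw [show c + ((0 : Nat) : Int) = c by omega] at hmiss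
      rw [hmiss]
      simp
  | succ N ih =>
      intro f c hhit hmiss hf
      obtain ⟨f', rfl⟩ : ∃ f', f = f' + 1 := ⟨f - 1, by omega⟩
      simp only [pvCountLoop]
      have h0 : keys.contains (prefix_ ++ "_" ++ PySem.Int.toStr (c + ((0 : Nat) : Int))) = true :=
        hhit 0 (by omega)
      rw [show c + ((0 : Nat) : Int) = c by omega] at h0
      rw [h0]
      simp only [if_true]
      have := ih f' (c + 1)
        (fun j hj => by
          have := hhit (j + 1) (by omega)
          rwa [show c + ((j + 1 : Nat) : Int) = c + 1 + (j : Int) by push_cast; ring] at this)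
        (by rwa [show c + ((N + 1 : Nat) : Int) = c + 1 + (N : Int) by push_cast; ring] at hmiss)
        (by omega)
      rw [this]
      push_cast
      ring

-- pigeonhole: some key 'p_j' with j ≤ len(keys) is missing
lemma pvExists_missA (keys : List String) (prefix_ : String) :
    ∃ j : Nat, j ≤ keys.length ∧ (prefix_ ++ "_" ++ PySem.Int.toStr (j : Int)) ∉ keys := by
  by_contra hc
  push Not at hc
  have hinj : Function.Injective (fun j : Nat => prefix_ ++ "_" ++ PySem.Int.toStr (j : Int)) := by
    intro a b hab
    simp only at hab
    have hl := congrArg String.toList hab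
    simp only [String.toList_append, List.append_assoc] at hl
    exact pvToStr_inj a b (String.ext (List.append_cancel_left (List.append_cancel_left hl)))
  have hsub : (Finset.range (keys.length + 1)).image
      (fun j : Nat => prefix_ ++ "_" ++ PySem.Int.toStr (j : Int)) ⊆ keys.toFinset := by
    intro x hx
    rw [Finset.mem_image] at hx
    obtain ⟨j, hj, rfl⟩ := hx
    rw [List.mem_toFinset]
    exact hc j (Nat.lt_succ_iff.mp (Finset.mem_range.mp hj))
  have hcard : keys.length + 1 ≤ keys.toFinset.card := by
    calc keys.length + 1
        = (Finset.range (keys.length + 1)).card := by simp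
      _ = ((Finset.range (keys.length + 1)).image
            (fun j : Nat => prefix_ ++ "_" ++ PySem.Int.toStr (j : Int))).card := by
          rw [Finset.card_image_of_injective _ hinj]
      _ ≤ keys.toFinset.card := Finset.card_le_card hsub
  have := keys.toFinset_card_le
  omega

-- B's sweep over a strictly increasing list returns the least value ≥ c not in the list
lemma pvScan_spec : ∀ (L : List Int), L.Pairwise (· < ·) → ∀ (c : Int), (∀ x ∈ L, c ≤ x) →
    (∀ d : Int, c ≤ d → d < pvMexScan L c → d ∈ L) ∧ pvMexScan L c ∉ L ∧ c ≤ pvMexScan L c := by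
  intro L
  induction L with
  | nil =>
      intro _ c _
      refine ⟨fun d hcd hd => by simp [pvMexScan] at hd; omega, by simp [pvMexScan], le_rfl⟩
  | cons v rest ih =>
      intro hpair c hge
      have hvrest : ∀ x ∈ rest, v < x := fun x hx => (List.pairwise_cons.mp hpair).1 x hx
      by_cases hvc : v = c
      · have hscan : pvMexScan (v :: rest) c = pvMexScan rest (c + 1) := by
          simp [pvMexScan, hvc]
        obtain ⟨h1, h2, h3⟩ := ih (List.pairwise_cons.mp hpair).2 (c + 1)
          (fun x hx => by have := hvrest x hx; omega)
        refine ⟨?_, ?_, ?_⟩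
        · intro d hcd hd
          rw [hscan] at hd
          by_cases hdc : d = c
          · exact List.mem_cons.mpr (Or.inl (by omega))
          · exact List.mem_cons.mpr (Or.inr (h1 d (by omega) hd))
        · rw [hscan]
          intro hmem
          rcases List.mem_cons.mp hmem with hmem | hmem
          · omega
          · exact h2 hmem
        · rw [hscan]; omega
      · have hscan : pvMexScan (v :: rest) c = c := by
          simp [pvMexScan, hvc]
        refine ⟨fun d hcd hd => by rw [hscan] at hd; omega, ?_, by rw [hscan]⟩
        rw [hscan]
        intro hmem
        rcases List.mem_cons.mp hmem with hmem | hmem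
        · exact hvc hmem.symm
        · have h1 := hvrest c hmem
          have h2 := hge v (by simp)
          omega

-- ===== VERDICT =====
theorem count_h5_keys_spec : Claim_equal_count_h5_keys := by
  unfold Claim_equal_count_h5_keys
  intro gp prefix_ _
  unfold Spec_count_h5_keys
  set keys := gp.map (·.1) with hkeys
  set L := PySem.List.sorted (pvVals gp (prefix_ ++ "_")) (fun x => x) false with hL
  -- the least missing index N
  have hEx : ∃ j : Nat, keys.contains (prefix_ ++ "_" ++ PySem.Int.toStr (j : Int)) = false := by
    obtain ⟨j, _, hj⟩ := pvExists_missA keys prefix_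
    exact ⟨j, by rwa [← Bool.not_eq_true, List.contains_iff_mem]⟩
  set N := Nat.find hEx with hNdef
  have hNmiss : keys.contains (prefix_ ++ "_" ++ PySem.Int.toStr (N : Int)) = false :=
    Nat.find_spec hEx
  have hNhit : ∀ j : Nat, j < N →
      keys.contains (prefix_ ++ "_" ++ PySem.Int.toStr (j : Int)) = true := by
    intro j hj
    have := Nat.find_min hEx hj
    simpa using this
  -- A computes N
  have hNle : N ≤ keys.length := by
    obtain ⟨j, hjle, hj⟩ := pvExists_missA keys prefix_
    have : N ≤ j := Nat.find_le (by rwa [← Bool.not_eq_true, List.contains_iff_mem])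
    omega
  have hA : count_h5_keys gp prefix_ = (N : Int) := by
    unfold count_h5_keys
    rw [← hkeys]
    have := pvLoopA keys prefix_ N (gp.length + 1) 0
      (fun j hj => by rw [show (0 : Int) + (j : Int) = (j : Int) by omega]; exact hNhit j hj)
      (by rw [show (0 : Int) + (N : Int) = (N : Int) by omega]; exact hNmiss)
      (by rw [hkeys] at hNle; simp at hNle; omega)
    rw [this]; omega
  -- B computes N
  have hpair : L.Pairwise (· < ·) := by
    rw [hL]
    unfold pvVals
    exact PySem.List.sorted_ofList_pairwise_lt _
  have hLv : ∀ x, x ∈ L ↔ x ∈ pvVals gp (prefix_ ++ "_") := by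
    intro x
    rw [hL]
    exact PySem.List.mem_sorted _ _ _ x
  have hnonneg : ∀ x ∈ L, (0 : Int) ≤ x := by
    intro x hx
    exact pvVals_nonneg gp (prefix_ ++ "_") x ((hLv x).mp hx)
  obtain ⟨hcov, hnot, hge0⟩ := pvScan_spec L hpair 0 hnonneg
  have hB : count_h5_keys_alt gp prefix_ = pvMexScan L 0 := rfl
  -- the two agree
  have hmemL : ∀ c : Nat, ((c : Int) ∈ L) ↔
      keys.contains (prefix_ ++ "_" ++ PySem.Int.toStr (c : Int)) = true := by
    intro c
    rw [hLv, ← pvMem_iff gp prefix_ c, List.contains_iff_mem, hkeys]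
  have hr1 : ¬ (pvMexScan L 0 < (N : Int)) := by
    intro hlt
    set r := pvMexScan L 0 with hrdef
    have hrnat : r = ((r.toNat : Nat) : Int) := by omega
    have hrN : r.toNat < N := by omega
    have := hNhit r.toNat hrN
    rw [← hmemL r.toNat, ← hrnat] at this
    exact hnot this
  have hr2 : ¬ ((N : Int) < pvMexScan L 0) := by
    intro hlt
    have hmem : ((N : Int)) ∈ L := hcov (N : Int) (by omega) hlt
    rw [hmemL N] at hmem
    rw [hmem] at hNmiss
    exact absurd hNmiss (by simp)
  rw [hA, hB]
  omega
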